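-- pv_equiv track=rewrite | github.com/pypi-data/pypi-mirror-348 | packages/ymvas/ymvas-1.0.7.tar.gz/ymvas-1.0.7/ymvas/client.py | _keyval
-- ===== SOURCE A (Python) =====
-- def _keyval(args,short_key,key,default=None):
--     trash = []
--     value = default
--     found = False
--     for i, c in enumerate(args):
--         if (c.startswith(key) or c.startswith(short_key)) and not found:
--             value = c.replace(c.split('=')[0]+'=',"")
--             found = True
--         else:
--             trash.append(c)
--     return trash, value
-- ===== SOURCE B (Python) =====
-- def _keyval(args, short_key, key, default=None):
--     idx = next((i for i, c in enumerate(args)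
--                 if c.startswith(key) or c.startswith(short_key)), None)
--     if idx is None:
--         return list(args), default
--     c = args[idx]
--     value = c.replace(c.split('=')[0] + '=', "")
--     return list(args[:idx]) + list(args[idx + 1:]), value
-- ===== Notes on version B (the rewrite author's own statement) =====
-- stated objective: simpler
-- what changed: B locates the first matching argument's index in one generator expression and then builds the remainder by slicing around it, dropping A's conditional-accumulation loop with its 'found' flag and incremental trash list.
import Mathlib
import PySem

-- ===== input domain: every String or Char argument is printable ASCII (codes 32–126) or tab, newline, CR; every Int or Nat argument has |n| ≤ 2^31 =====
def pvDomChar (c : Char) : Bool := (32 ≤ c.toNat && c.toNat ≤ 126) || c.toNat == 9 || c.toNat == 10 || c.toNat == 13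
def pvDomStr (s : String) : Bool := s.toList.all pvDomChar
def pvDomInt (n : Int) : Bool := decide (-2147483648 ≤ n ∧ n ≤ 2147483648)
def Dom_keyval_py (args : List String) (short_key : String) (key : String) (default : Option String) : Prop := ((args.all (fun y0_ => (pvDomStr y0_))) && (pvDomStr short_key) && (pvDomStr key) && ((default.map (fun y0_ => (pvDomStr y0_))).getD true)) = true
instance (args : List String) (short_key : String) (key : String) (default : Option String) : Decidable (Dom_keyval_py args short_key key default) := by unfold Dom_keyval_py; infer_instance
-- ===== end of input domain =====

-- ===== PORT A =====
-- B is a locate-then-slice re-decomposition of A (objective: simpler); same return value everywhere.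
-- shared sub-expression of both Pythons: c.replace(c.split('=')[0] + '=', "")
-- (split('=') with a nonempty separator always returns a nonempty list, so [0] is its head)
def pvExtract (c : String) : String :=
  PySem.Str.replace c (((PySem.Str.split? c "=").getD []).headD "" ++ "=") ""

-- the for-loop of A as structural recursion over args with the loop state (trash, value, found)
def keyvalGo (short_key : String) (key : String) :
    List String → List String → Option String → Bool → List String × Option String
  | [], trash, value, _ => (trash, value)
  | c :: rest, trash, value, found =>
    if ((PySem.Str.startswith c key || PySem.Str.startswith c short_key) && !found) then
      keyvalGo short_key key rest trash (some (pvExtract c)) true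
    else
      keyvalGo short_key key rest (trash ++ [c]) value found

def keyval_py (args : List String) (short_key : String) (key : String) (default : Option String) : List String × Option String :=
  keyvalGo short_key key args [] default false

-- ===== PORT B =====
-- idx = next((i for i, c in enumerate(args) if c.startswith(key) or c.startswith(short_key)), None)
def keyvalFind (short_key : String) (key : String) : List String → Option Nat
  | [] => none
  | c :: rest =>
    if (PySem.Str.startswith c key || PySem.Str.startswith c short_key) then some 0
    else (keyvalFind short_key key rest).map (· + 1)

def keyval_py_alt (args : List String) (short_key : String) (key : String) (default : Option String) : List String × Option String :=
  match keyvalFind short_key key args with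
  | none => (args, default)
  | some idx =>
    -- c = args[idx] (idx valid by construction)
    let c := args.getD idx ""
    -- args[:idx] + args[idx+1:]
    (PySem.List.slice args none (some (idx : Int)) ++ PySem.List.slice args (some ((idx : Int) + 1)) none,
     some (pvExtract c))

-- ===== PRECONDITION & SPEC =====
def Spec_keyval_py (args : List String) (short_key : String) (key : String) (default : Option String) (out : List String × Option String) : Prop := out = keyval_py_alt args short_key key default
instance (args : List String) (short_key : String) (key : String) (default : Option String) (out : List String × Option String) : Decidable (Spec_keyval_py args short_key key default out) := by unfold Spec_keyval_py; infer_instance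

-- ===== CLAIM (what is proved, stated in full; the proofs are below) =====
def Claim_equal_keyval_py : Prop := ∀ (args : List String) (short_key : String) (key : String) (default : Option String), Dom_keyval_py args short_key key default → Spec_keyval_py args short_key key default (keyval_py args short_key key default)

-- ===== LEMMAS AND PROOFS =====
-- once found, A just copies the remaining args onto trash
theorem keyvalGo_true (sk k : String) (l trash : List String) (v : Option String) :
    keyvalGo sk k l trash v true = (trash ++ l, v) := by
  induction l generalizing trash with
  | nil => simp [keyvalGo]
  | cons c rest ih => simp [keyvalGo, ih]

-- B on a non-matching head prepends it and recurses
theorem alt_cons (sk k : String) (c : String) (rest : List String) (d : Option String)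
    (h : (PySem.Str.startswith c k || PySem.Str.startswith c sk) = false) :
    keyval_py_alt (c :: rest) sk k d =
      (c :: (keyval_py_alt rest sk k d).1, (keyval_py_alt rest sk k d).2) := by
  simp only [PySem.Str.startswith_eq, Bool.or_eq_false_iff] at h
  cases hf : keyvalFind sk k rest with
  | none => simp [keyval_py_alt, keyvalFind, h.1, h.2, hf]
  | some i =>
    simp only [keyval_py_alt, keyvalFind, PySem.Str.startswith_eq, h.1, h.2, Bool.or_self,
      Bool.false_eq_true, if_false, hf, Option.map_some]
    have h2 : (((i + 1 : Nat) : Int) + 1) = ((i + 2 : Nat) : Int) := by push_cast; ring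
    have h1 : (((i : Nat) : Int) + 1) = ((i + 1 : Nat) : Int) := by push_cast; ring
    rw [h2]
    simp only [PySem.List.slice_to_natCast, PySem.List.slice_from_natCast, h1]
    simp [List.getD]

-- A with pending trash equals B with the trash prefixed
theorem go_eq_alt (sk k : String) (l trash : List String) (d : Option String) :
    keyvalGo sk k l trash d false =
      (trash ++ (keyval_py_alt l sk k d).1, (keyval_py_alt l sk k d).2) := by
  induction l generalizing trash with
  | nil => simp [keyvalGo, keyval_py_alt, keyvalFind]
  | cons c rest ih =>
    by_cases h : (PySem.Str.startswith c k || PySem.Str.startswith c sk) = true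
    · rw [keyvalGo, if_pos (by simp only [h, Bool.not_false, Bool.and_true]), keyvalGo_true]
      simp only [keyval_py_alt, keyvalFind, h, if_true]
      simp [PySem.List.slice, PySem.List.clampIdx, List.getD]
    · have h' : (PySem.Str.startswith c k || PySem.Str.startswith c sk) = false :=
        Bool.eq_false_iff.mpr h
      have hc : ((PySem.Str.startswith c k || PySem.Str.startswith c sk) && !false) ≠ true := by
        simp only [h', Bool.not_false, Bool.and_true]; exact Bool.false_ne_true
      rw [keyvalGo, if_neg hc, ih, alt_cons sk k c rest d h']
      simp

-- ===== VERDICT (by name: the statement is the Claim_ definition above) =====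
theorem keyval_py_spec : Claim_equal_keyval_py := by
  intro args sk k d _
  unfold Spec_keyval_py keyval_py
  rw [go_eq_alt]
  simp
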